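-- pv_equiv track=rewrite | github.com/heartcatched/rl_sudoku | code/scripts/human_features_sudoku.py | count_by_size
-- ===== SOURCE A (Python) =====
-- from typing import List, Tuple, Dict, Set
--
-- def count_by_size(cset: List[Set[int]]) -> Tuple[int,int,int,int]:
--     """сколько клеток с 1/2/3/≥4 кандидатами среди переданного списка"""
--     ones=twos=threes=ge4=0
--     for S in cset:
--         k=len(S)
--         if k==1: ones+=1
--         elif k==2: twos+=1
--         elif k==3: threes+=1
--         elif k>=4: ge4+=1
--     return ones, twos, threes, ge4
-- ===== SOURCE B (Python) =====
-- def count_by_size(cset):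
--     """сколько клеток с 1/2/3/≥4 кандидатами среди переданного списка"""
--     sizes = [len(S) for S in cset]
--     ones = sizes.count(1)
--     twos = sizes.count(2)
--     threes = sizes.count(3)
--     ge4 = len(sizes) - sizes.count(0) - ones - twos - threes
--     return ones, twos, threes, ge4
-- ===== Notes on version B (the rewrite author's own statement) =====
-- stated objective: idiomatic
-- what changed: Replaces A's single pass with a per-cell if/elif branch chain by staged counting: build the size list once, read the 1/2/3 buckets with list.count, and obtain the >=4 bucket arithmetically as the complement (total minus the 0/1/2/3 counts, exact since sizes are nonnegative) - no explicit branching loop at all.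
import Mathlib
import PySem

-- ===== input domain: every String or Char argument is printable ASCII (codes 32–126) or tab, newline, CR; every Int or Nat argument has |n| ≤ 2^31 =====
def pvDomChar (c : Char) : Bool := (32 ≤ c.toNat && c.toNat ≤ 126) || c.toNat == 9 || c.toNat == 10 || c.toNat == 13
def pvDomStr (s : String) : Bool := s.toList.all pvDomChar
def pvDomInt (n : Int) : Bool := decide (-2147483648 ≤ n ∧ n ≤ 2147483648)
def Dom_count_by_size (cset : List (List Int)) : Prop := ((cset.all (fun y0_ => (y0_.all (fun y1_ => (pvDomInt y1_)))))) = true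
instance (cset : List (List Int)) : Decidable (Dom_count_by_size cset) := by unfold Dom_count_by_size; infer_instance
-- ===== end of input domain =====

-- B replaces A's branching loop by staged list.count passes plus an arithmetic complement for the >=4 bucket; objective: more idiomatic, same cost.

-- ===== PORT A =====
def count_by_size (cset : List (List Int)) : Int × Int × Int × Int :=
  cset.foldl
    (fun st S =>
      if (S.length : Int) = 1 then (st.1 + 1, st.2.1, st.2.2.1, st.2.2.2)
      else if (S.length : Int) = 2 then (st.1, st.2.1 + 1, st.2.2.1, st.2.2.2)
      else if (S.length : Int) = 3 then (st.1, st.2.1, st.2.2.1 + 1, st.2.2.2)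
      else if 4 ≤ (S.length : Int) then (st.1, st.2.1, st.2.2.1, st.2.2.2 + 1)
      else st)
    (0, 0, 0, 0)

-- ===== PORT B =====
def count_by_size_alt (cset : List (List Int)) : Int × Int × Int × Int :=
  let sizes : List Int := cset.map (fun S => (S.length : Int))
  let ones : Int := (PySem.List.count sizes 1 : Nat)
  let twos : Int := (PySem.List.count sizes 2 : Nat)
  let threes : Int := (PySem.List.count sizes 3 : Nat)
  let ge4 : Int := (sizes.length : Int) - (PySem.List.count sizes 0 : Nat) - ones - twos - threes
  (ones, twos, threes, ge4)

-- ===== PRECONDITION & SPEC =====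
def Spec_count_by_size (cset : List (List Int)) (out : Int × Int × Int × Int) : Prop := out = count_by_size_alt cset
instance (cset : List (List Int)) (out : Int × Int × Int × Int) : Decidable (Spec_count_by_size cset out) := by unfold Spec_count_by_size; infer_instance

-- ===== CLAIM (what is proved, stated in full; the proofs are below) =====
def Claim_equal_count_by_size : Prop := ∀ (cset : List (List Int)), Dom_count_by_size cset → Spec_count_by_size cset (count_by_size cset)

-- ===== LEMMAS AND PROOFS =====

-- A's fold, run from any start state, adds the bucket counts of the size list.
lemma countA_char (cset : List (List Int)) (a b c g : Int) :
    cset.foldl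
      (fun st S =>
        if (S.length : Int) = 1 then (st.1 + 1, st.2.1, st.2.2.1, st.2.2.2)
        else if (S.length : Int) = 2 then (st.1, st.2.1 + 1, st.2.2.1, st.2.2.2)
        else if (S.length : Int) = 3 then (st.1, st.2.1, st.2.2.1 + 1, st.2.2.2)
        else if 4 ≤ (S.length : Int) then (st.1, st.2.1, st.2.2.1, st.2.2.2 + 1)
        else st)
      (a, b, c, g)
    = (a + ((cset.map (fun S => (S.length : Int))).count 1 : Nat),
       b + ((cset.map (fun S => (S.length : Int))).count 2 : Nat),
       c + ((cset.map (fun S => (S.length : Int))).count 3 : Nat),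
       g + ((cset.map (fun S => (S.length : Int))).countP (fun k => 4 ≤ k) : Nat)) := by
  induction cset generalizing a b c g with
  | nil => simp
  | cons S rest ih =>
    simp only [List.foldl_cons, List.map_cons, List.count_cons, List.countP_cons]
    rw [ih]
    by_cases h1 : (S.length : Int) = 1
    · simp [h1]; omega
    · by_cases h2 : (S.length : Int) = 2
      · simp [h2]; omega
      · by_cases h3 : (S.length : Int) = 3
        · simp [h3]; omega
        · by_cases h4 : (4 : Int) ≤ (S.length : Int)
          · simp [h1, h2, h3, h4]; omega
          · simp [h1, h2, h3, h4]

-- On a list of nonnegative ints every element is 0, 1, 2, 3 or ≥4, so the ≥4 count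
-- is the complement of the other four buckets.
lemma countP_ge4_complement (sizes : List Int) (h : ∀ x ∈ sizes, 0 ≤ x) :
    ((sizes.countP (fun k => 4 ≤ k) : Nat) : Int)
      = (sizes.length : Int) - (sizes.count 0 : Nat) - (sizes.count 1 : Nat)
        - (sizes.count 2 : Nat) - (sizes.count 3 : Nat) := by
  induction sizes with
  | nil => simp
  | cons x t ih =>
    have hx : (0 : Int) ≤ x := h x (List.mem_cons_self)
    have iht := ih (fun y hy => h y (List.mem_cons_of_mem _ hy))
    simp only [List.countP_cons, List.count_cons, List.length_cons]
    have hcase : x = 0 ∨ x = 1 ∨ x = 2 ∨ x = 3 ∨ (4:Int) ≤ x := by omega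
    rcases hcase with h|h|h|h|h
    · subst h; simp only [show ¬((4:Int) ≤ 0) by omega, decide_false]; simp; omega
    · subst h; simp only [show ¬((4:Int) ≤ 1) by omega, decide_false]; simp; omega
    · subst h; simp only [show ¬((4:Int) ≤ 2) by omega, decide_false]; simp; omega
    · subst h; simp only [show ¬((4:Int) ≤ 3) by omega, decide_false]; simp; omega
    · have h0 : ¬ (x = 0) := by omega
      have h1 : ¬ (x = 1) := by omega
      have h2 : ¬ (x = 2) := by omega
      have h3 : ¬ (x = 3) := by omega
      simp [h, h0, h1, h2, h3]; omega

-- ===== VERDICT (by name: the statement is the Claim_ definition above) =====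
theorem count_by_size_spec : Claim_equal_count_by_size := by
  intro cset _
  unfold Spec_count_by_size count_by_size count_by_size_alt
  rw [countA_char]
  simp only [PySem.List.count_eq]
  have hnn : ∀ x ∈ cset.map (fun S => (S.length : Int)), 0 ≤ x := by
    intro x hx
    rcases List.mem_map.mp hx with ⟨S, _, rfl⟩
    exact Int.natCast_nonneg _
  rw [show (0 : Int) + ((cset.map (fun S => (S.length : Int))).countP (fun k => 4 ≤ k) : Nat)
      = (((cset.map (fun S => (S.length : Int))).countP (fun k => 4 ≤ k) : Nat) : Int) by ring]
  rw [countP_ge4_complement _ hnn]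
  simp [List.length_map]
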